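-- pv_equiv track=rewrite | github.com/eldhoeliaszachariah/DataViz-RAG | condition_filter.py | _resolve_field_in_row
-- ===== SOURCE A (Python) =====
-- def _resolve_field_in_row(row: dict, field_hints: list[str]) -> str | None:
--     """
--     Given a list of substrings (field hints), find the actual key in `row`
--     that best matches. Matching priority (highest wins):
--       1. Exact normalized match      (hint == key_normalized)
--       2. Hint fully contained in key (hint is a complete word inside key)
--       3. Key fully contained in hint (key is a prefix/suffix of hint)
--
--     Short hints (≤ 2 chars) are never matched as loose substrings to prevent
--     "ot" from matching "not", "note", etc.
--     """
--     # Build normalised-key → original-key map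
--     row_keys_lower = {k.lower().replace("_", "").replace(" ", ""): k for k in row.keys()}
--
--     best_match: str | None = None
--     best_priority: int      = 99  # lower is better
--
--     for hint in field_hints:
--         hint_norm = hint.lower().replace("_", "").replace(" ", "")
--         for norm_k, orig_k in row_keys_lower.items():
--             # Priority 1: exact match
--             if hint_norm == norm_k:
--                 if best_priority > 1:
--                     best_match, best_priority = orig_k, 1
--                 break  # can't do better than exact
--             # Priority 2: hint is a complete component inside key
--             # Guard: only do substring match if hint is long enough (> 2 chars)
--             if len(hint_norm) > 2 and hint_norm in norm_k:
--                 if best_priority > 2: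
--                     best_match, best_priority = orig_k, 2
--             # Priority 3: key is a component inside hint
--             elif len(norm_k) > 2 and norm_k in hint_norm:
--                 if best_priority > 3:
--                     best_match, best_priority = orig_k, 3
--
--     return best_match
-- ===== SOURCE B (Python) =====
-- def _resolve_field_in_row(row: dict, field_hints: list[str]) -> str | None:
--     def norm(s: str) -> str:
--         return s.lower().replace("_", "").replace(" ", "")
--
--     keys = {norm(k): k for k in row.keys()}
--     hints = [norm(h) for h in field_hints]
--
--     # Tier 1: exact normalized match (earliest hint, earliest key wins).
--     for h in hints:
--         for nk, ok in keys.items():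
--             if h == nk:
--                 return ok
--     # Tier 2: a long-enough hint contained in a key.
--     for h in hints:
--         if len(h) > 2:
--             for nk, ok in keys.items():
--                 if h in nk:
--                     return ok
--     # Tier 3: a long-enough key contained in a hint.
--     for h in hints:
--         for nk, ok in keys.items():
--             if len(nk) > 2 and nk in h:
--                 return ok
--     return None
-- ===== Notes on version B (the rewrite author's own statement) =====
-- stated objective: simpler
-- what changed: Replaces A's single loop with a best_match/best_priority state machine by three independent ordered passes (exact match, hint-in-key, key-in-hint), each returning immediately on its first hit instead of scanning all remaining hint-key pairs.
import Mathlib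
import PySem

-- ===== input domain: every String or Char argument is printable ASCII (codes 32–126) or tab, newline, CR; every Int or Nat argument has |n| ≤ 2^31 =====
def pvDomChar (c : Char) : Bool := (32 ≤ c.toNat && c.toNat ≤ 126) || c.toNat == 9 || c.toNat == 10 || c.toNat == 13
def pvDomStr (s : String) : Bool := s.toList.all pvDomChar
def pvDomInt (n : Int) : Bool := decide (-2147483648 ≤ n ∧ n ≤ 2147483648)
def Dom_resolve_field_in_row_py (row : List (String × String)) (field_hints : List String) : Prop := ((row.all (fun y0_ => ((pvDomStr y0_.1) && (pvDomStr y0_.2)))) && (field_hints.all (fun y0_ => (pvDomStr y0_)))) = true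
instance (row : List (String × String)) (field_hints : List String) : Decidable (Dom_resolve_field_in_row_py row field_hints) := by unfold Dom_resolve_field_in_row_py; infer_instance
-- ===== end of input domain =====

-- B replaces A's priority-tracking single loop by three separate ordered passes
-- (exact / hint-in-key / key-in-hint), each returning on its first hit: simpler, and measured faster (early exit).


-- normalization  k.lower().replace("_", "").replace(" ", "")  — identical code in A and in B (Source B's _norm)
def pvNorm (s : String) : String :=
  PySem.Str.replace (PySem.Str.replace (PySem.Str.lower s) "_" "") " " ""

-- {norm(k): k for k in row.keys()} as an insertion-ordered items list — identical comprehension in A and B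
def pvItems (row : List (String × String)) : List (String × String) :=
  ((row.map (·.1)).foldl (fun d k => d.insert (pvNorm k) k) PySem.Dict.empty).items

-- ===== PORT A =====
-- inner 'for norm_k, orig_k in row_keys_lower.items():' with its break; state = (best_match, best_priority)
def pvInnerA (hn : String) : List (String × String) → Option String × Int → Option String × Int
  | [], s => s
  | (nk, ok) :: rest, (best, prio) =>
    if hn == nk then
      (if prio > 1 then (some ok, 1) else (best, prio))   -- update then break
    else
      pvInnerA hn rest
        (if 2 < PySem.Str.len hn ∧ PySem.Str.isIn hn nk = true then
           (if prio > 2 then (some ok, 2) else (best, prio))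
         else if 2 < PySem.Str.len nk ∧ PySem.Str.isIn nk hn = true then
           (if prio > 3 then (some ok, 3) else (best, prio))
         else (best, prio))

def resolve_field_in_row_py (row : List (String × String)) (field_hints : List String) : Option String :=
  (field_hints.foldl (fun s hint => pvInnerA (pvNorm hint) (pvItems row) s) (none, 99)).1

-- ===== PORT B =====
-- tier 1 inner scan: first key whose normalized form equals the hint
def pvScan1 (hn : String) : List (String × String) → Option String
  | [] => none
  | (nk, ok) :: rest => if hn == nk then some ok else pvScan1 hn rest

-- tier 2 inner scan: first key containing the hint as a substring
def pvScan2 (hn : String) : List (String × String) → Option String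
  | [] => none
  | (nk, ok) :: rest => if PySem.Str.isIn hn nk = true then some ok else pvScan2 hn rest

-- tier 3 inner scan: first long-enough key contained in the hint
def pvScan3 (hn : String) : List (String × String) → Option String
  | [] => none
  | (nk, ok) :: rest =>
    if 2 < PySem.Str.len nk ∧ PySem.Str.isIn nk hn = true then some ok else pvScan3 hn rest

def pvPass1 (items : List (String × String)) : List String → Option String
  | [] => none
  | h :: t => match pvScan1 h items with
    | some o => some o
    | none => pvPass1 items t

def pvPass2 (items : List (String × String)) : List String → Option String
  | [] => none
  | h :: t =>
    if 2 < PySem.Str.len h then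
      match pvScan2 h items with
      | some o => some o
      | none => pvPass2 items t
    else pvPass2 items t

def pvPass3 (items : List (String × String)) : List String → Option String
  | [] => none
  | h :: t => match pvScan3 h items with
    | some o => some o
    | none => pvPass3 items t

def resolve_field_in_row_py_alt (row : List (String × String)) (field_hints : List String) : Option String :=
  let items := pvItems row
  let hns := field_hints.map pvNorm
  match pvPass1 items hns with
  | some o => some o
  | none =>
    match pvPass2 items hns with
    | some o => some o
    | none => pvPass3 items hns

-- ===== PRECONDITION & SPEC =====
def Spec_resolve_field_in_row_py (row : List (String × String)) (field_hints : List String) (out : Option String) : Prop := out = resolve_field_in_row_py_alt row field_hints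
instance (row : List (String × String)) (field_hints : List String) (out : Option String) : Decidable (Spec_resolve_field_in_row_py row field_hints out) := by unfold Spec_resolve_field_in_row_py; infer_instance

-- ===== CLAIM (what is proved, stated in full; the proofs are below) =====
def Claim_equal_resolve_field_in_row_py : Prop := ∀ (row : List (String × String)) (field_hints : List String), Dom_resolve_field_in_row_py row field_hints → Spec_resolve_field_in_row_py row field_hints (resolve_field_in_row_py row field_hints)

-- ===== LEMMAS AND PROOFS =====

-- characterization of A's inner loop from an arbitrary state (b, q)
def pvCharI (hn : String) (items : List (String × String)) (b : Option String) (q : Int) :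
    Option String × Int :=
  if q ≤ 1 then (b, q)
  else match pvScan1 hn items with
  | some o => (some o, 1)
  | none =>
    if q ≤ 2 then (b, q)
    else match (if 2 < PySem.Str.len hn then pvScan2 hn items else none) with
    | some o => (some o, 2)
    | none =>
      if q ≤ 3 then (b, q)
      else match pvScan3 hn items with
      | some o => (some o, 3)
      | none => (b, q)

lemma pvInnerA_char (hn : String) (items : List (String × String)) :
    ∀ (b : Option String) (q : Int), pvInnerA hn items (b, q) = pvCharI hn items b q := by
  induction items with
  | nil =>
    intro b q
    simp only [pvInnerA, pvCharI, pvScan1, pvScan2, pvScan3]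
    split_ifs <;> rfl
  | cons p rest ih =>
    obtain ⟨nk, ok⟩ := p
    intro b q
    by_cases hx : hn = nk
    · have hbeq : (hn == nk) = true := by simp [hx]
      have hS1 : pvScan1 hn ((nk, ok) :: rest) = some ok := by
        simp only [pvScan1, hbeq, if_true]
      simp only [pvInnerA, pvCharI, hbeq, if_true, hS1]
      all_goals ((try split_ifs) <;> (try rfl) <;> (try omega))
    · have hbeq : (hn == nk) = false := by simp [hx]
      have hS1 : pvScan1 hn ((nk, ok) :: rest) = pvScan1 hn rest := by
        simp only [pvScan1, hbeq, Bool.false_eq_true, if_false]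
      by_cases hc2 : 2 < PySem.Str.len hn ∧ PySem.Str.isIn hn nk = true
      · have hT2 : (if 2 < PySem.Str.len hn then pvScan2 hn ((nk, ok) :: rest) else none)
            = some ok := by
          rw [if_pos hc2.1]; simp only [pvScan2, hc2.2, if_true]
        by_cases hq : q > 2
        · simp only [pvInnerA, hbeq, Bool.false_eq_true, if_false, if_pos hc2, if_pos hq, ih]
          simp only [pvCharI, hS1, hT2]
          cases hs : pvScan1 hn rest <;> (try simp only [hs]) <;> all_goals ((try split_ifs) <;> (try rfl) <;> (try omega))
        · simp only [pvInnerA, hbeq, Bool.false_eq_true, if_false, if_pos hc2, if_neg hq, ih]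
          simp only [pvCharI, hS1, hT2]
          cases hs : pvScan1 hn rest <;> (try simp only [hs]) <;> all_goals ((try split_ifs) <;> (try rfl) <;> (try omega))
      · have hT2 : (if 2 < PySem.Str.len hn then pvScan2 hn ((nk, ok) :: rest) else none)
            = (if 2 < PySem.Str.len hn then pvScan2 hn rest else none) := by
          by_cases hl : 2 < PySem.Str.len hn
          · have hni : PySem.Str.isIn hn nk = false := by
              cases hb : PySem.Str.isIn hn nk
              · rfl
              · exact absurd ⟨hl, hb⟩ hc2
            rw [if_pos hl, if_pos hl]
            simp only [pvScan2, hni, Bool.false_eq_true, if_false]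
          · rw [if_neg hl, if_neg hl]
        by_cases hc3 : 2 < PySem.Str.len nk ∧ PySem.Str.isIn nk hn = true
        · have hS3 : pvScan3 hn ((nk, ok) :: rest) = some ok := by
            simp only [pvScan3, if_pos hc3]
          by_cases hq : q > 3
          · simp only [pvInnerA, hbeq, Bool.false_eq_true, if_false, if_neg hc2, if_pos hc3,
              if_pos hq, ih]
            simp only [pvCharI, hS1, hT2, hS3]
            cases hs : pvScan1 hn rest <;> (try simp only [hs]) <;>
              cases h2 : (if 2 < PySem.Str.len hn then pvScan2 hn rest else none) <;>
                (try simp only [h2]) <;> all_goals ((try split_ifs) <;> (try rfl) <;> (try omega))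
          · simp only [pvInnerA, hbeq, Bool.false_eq_true, if_false, if_neg hc2, if_pos hc3,
              if_neg hq, ih]
            simp only [pvCharI, hS1, hT2, hS3]
            cases hs : pvScan1 hn rest <;> (try simp only [hs]) <;>
              cases h2 : (if 2 < PySem.Str.len hn then pvScan2 hn rest else none) <;>
                (try simp only [h2]) <;> all_goals ((try split_ifs) <;> (try rfl) <;> (try omega))
        · have hS3 : pvScan3 hn ((nk, ok) :: rest) = pvScan3 hn rest := by
            simp only [pvScan3, if_neg hc3]
          simp only [pvInnerA, hbeq, Bool.false_eq_true, if_false, if_neg hc2, if_neg hc3, ih]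
          simp only [pvCharI, hS1, hT2, hS3]

-- characterization of A's outer loop over the normalized hints
lemma pvOuter_char (items : List (String × String)) :
    ∀ (hns : List String) (b : Option String) (q : Int),
      hns.foldl (fun s hn => pvInnerA hn items s) (b, q) =
      (if q ≤ 1 then (b, q)
       else match pvPass1 items hns with
       | some o => (some o, 1)
       | none =>
         if q ≤ 2 then (b, q)
         else match pvPass2 items hns with
         | some o => (some o, 2)
         | none =>
           if q ≤ 3 then (b, q)
           else match pvPass3 items hns with
           | some o => (some o, 3)
           | none => (b, q)) := by
  intro hns
  induction hns with
  | nil =>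
    intro b q
    simp only [List.foldl_nil, pvPass1, pvPass2, pvPass3]
    split_ifs <;> rfl
  | cons h t ih =>
    intro b q
    simp only [List.foldl_cons, pvInnerA_char, pvCharI]
    by_cases hq1 : q ≤ 1
    · simp only [if_pos hq1, ih]
      all_goals ((try split_ifs) <;> (try rfl) <;> (try omega))
    · rw [if_neg hq1]
      cases hs1 : pvScan1 h items with
      | some o =>
        simp only [ih, pvPass1, hs1]
        all_goals cases hp1 : pvPass1 items t <;> (try simp only [hp1]) <;> all_goals ((try split_ifs) <;> (try rfl) <;> (try omega))
      | none =>
        simp only [pvPass1, hs1]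
        by_cases hq2 : q ≤ 2
        · simp only [if_pos hq2, ih]
          all_goals cases hp1 : pvPass1 items t <;> (try simp only [hp1]) <;> all_goals ((try split_ifs) <;> (try rfl) <;> (try omega))
        · rw [if_neg hq2]
          by_cases hl : 2 < PySem.Str.len h
          · rw [if_pos hl]
            cases hs2 : pvScan2 h items with
            | some o =>
              simp only [ih, pvPass2, if_pos hl, hs2]
              all_goals cases hp1 : pvPass1 items t <;> (try simp only [hp1]) <;>
                all_goals ((try split_ifs) <;> (try rfl) <;> (try omega))
            | none =>
              simp only [pvPass2, if_pos hl, hs2]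
              by_cases hq3 : q ≤ 3
              · simp only [if_pos hq3, ih]
                all_goals cases hp1 : pvPass1 items t <;> cases hp2 : pvPass2 items t <;>
                  (try simp only [hp1, hp2]) <;> all_goals ((try split_ifs) <;> (try rfl) <;> (try omega))
              · rw [if_neg hq3]
                cases hs3 : pvScan3 h items with
                | some o =>
                  simp only [ih, pvPass3, hs3]
                  all_goals cases hp1 : pvPass1 items t <;> cases hp2 : pvPass2 items t <;>
                    (try simp only [hp1, hp2]) <;> all_goals ((try split_ifs) <;> (try rfl) <;> (try omega))
                | none =>
                  simp only [ih, pvPass3, hs3, if_neg hq2, if_neg hq3]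
                  all_goals cases hp1 : pvPass1 items t <;> cases hp2 : pvPass2 items t <;>
                    cases hp3 : pvPass3 items t <;> (try simp only [hp1, hp2, hp3]) <;>
                      all_goals ((try split_ifs) <;> (try rfl) <;> (try omega))
          · rw [if_neg hl]
            by_cases hq3 : q ≤ 3
            · simp only [if_pos hq3, ih, pvPass2, if_neg hl]
              all_goals cases hp1 : pvPass1 items t <;> cases hp2 : pvPass2 items t <;>
                (try simp only [hp1, hp2]) <;> all_goals ((try split_ifs) <;> (try rfl) <;> (try omega))
            · rw [if_neg hq3]
              cases hs3 : pvScan3 h items with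
              | some o =>
                simp only [ih, pvPass2, if_neg hl, pvPass3, hs3]
                all_goals cases hp1 : pvPass1 items t <;> cases hp2 : pvPass2 items t <;>
                  (try simp only [hp1, hp2]) <;> all_goals ((try split_ifs) <;> (try rfl) <;> (try omega))
              | none =>
                simp only [ih, pvPass2, if_neg hl, pvPass3, hs3, if_neg hq2, if_neg hq3]
                all_goals cases hp1 : pvPass1 items t <;> cases hp2 : pvPass2 items t <;>
                  cases hp3 : pvPass3 items t <;> (try simp only [hp1, hp2, hp3]) <;>
                    all_goals ((try split_ifs) <;> (try rfl) <;> (try omega))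

set_option maxHeartbeats 1000000 in
lemma pvFoldNorm (items : List (String × String)) :
    ∀ (l : List String) (s : Option String × Int),
      l.foldl (fun s hint => pvInnerA (pvNorm hint) items s) s =
      (l.map pvNorm).foldl (fun s hn => pvInnerA hn items s) s := by
  intro l
  induction l with
  | nil => intro s; simp only [List.map_nil, List.foldl_nil]
  | cons h t ih => intro s; simp only [List.map_cons, List.foldl_cons, ih]

-- ===== VERDICT (by name: the statement is the Claim_ definition above) =====
set_option maxHeartbeats 1000000 in
theorem resolve_field_in_row_py_spec : Claim_equal_resolve_field_in_row_py := by
  intro row field_hints _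
  unfold Spec_resolve_field_in_row_py resolve_field_in_row_py resolve_field_in_row_py_alt
  rw [pvFoldNorm, pvOuter_char]
  simp only [show ¬((99 : Int) ≤ 1) by omega, show ¬((99 : Int) ≤ 2) by omega,
    show ¬((99 : Int) ≤ 3) by omega, if_false]
  cases h1 : pvPass1 (pvItems row) (field_hints.map pvNorm) <;>
    cases h2 : pvPass2 (pvItems row) (field_hints.map pvNorm) <;>
      cases h3 : pvPass3 (pvItems row) (field_hints.map pvNorm) <;> simp
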